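-- pv_equiv track=rewrite | github.com/math707/Analyse-et-optimisation-des-correspondances-intermodales-en-Valais_model | singletrack_v2.py | _pair_arr_dep_to_abs
-- ===== SOURCE A (Python) =====
-- def _pair_arr_dep_to_abs(arr_minutes, dep_minutes, dwell_minutes, period=60):
--     arr_mod = [int(x) % period for x in arr_minutes]
--     dep_mod = [int(x) % period for x in dep_minutes]
--     dwell   = [int(x) for x in dwell_minutes]
--
--     arr_abs = []
--     dep_abs = []
--
--     for a, d, dw in zip(arr_mod, dep_mod, dwell):
--         a_abs = a
--         d_abs = d
--
--         # dep doit être après arr + dwell (autorise wrap)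
--         while d_abs < a_abs + dw:
--             d_abs += period
--
--         arr_abs.append(a_abs)
--         dep_abs.append(d_abs)
--
--     return arr_abs, dep_abs
-- ===== SOURCE B (Python) =====
-- def _snap(x, y, z, period):
--     a = int(x) % period
--     d = int(y) % period
--     need = a + int(z) - d
--     if need > 0:
--         # one ceil-division step instead of repeated addition
--         d += -(-need // period) * period
--     return a, d
--
--
-- def _pair_arr_dep_to_abs(arr_minutes, dep_minutes, dwell_minutes, period=60):
--     pairs = [_snap(x, y, z, period)
--              for x, y, z in zip(arr_minutes, dep_minutes, dwell_minutes)]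
--     return [p[0] for p in pairs], [p[1] for p in pairs]
-- ===== Notes on version B (the rewrite author's own statement) =====
-- stated objective: alternative
-- what changed: Replaces the per-element 'while d_abs < a+dw: d_abs += period' repeated-addition loop by a single ceil-division formula d + ceil((a+dw-d)/period)*period, computed per element of the zipped lists; bounded loop becomes one arithmetic step, the measured times are comparable on the generated inputs.
import Mathlib
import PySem

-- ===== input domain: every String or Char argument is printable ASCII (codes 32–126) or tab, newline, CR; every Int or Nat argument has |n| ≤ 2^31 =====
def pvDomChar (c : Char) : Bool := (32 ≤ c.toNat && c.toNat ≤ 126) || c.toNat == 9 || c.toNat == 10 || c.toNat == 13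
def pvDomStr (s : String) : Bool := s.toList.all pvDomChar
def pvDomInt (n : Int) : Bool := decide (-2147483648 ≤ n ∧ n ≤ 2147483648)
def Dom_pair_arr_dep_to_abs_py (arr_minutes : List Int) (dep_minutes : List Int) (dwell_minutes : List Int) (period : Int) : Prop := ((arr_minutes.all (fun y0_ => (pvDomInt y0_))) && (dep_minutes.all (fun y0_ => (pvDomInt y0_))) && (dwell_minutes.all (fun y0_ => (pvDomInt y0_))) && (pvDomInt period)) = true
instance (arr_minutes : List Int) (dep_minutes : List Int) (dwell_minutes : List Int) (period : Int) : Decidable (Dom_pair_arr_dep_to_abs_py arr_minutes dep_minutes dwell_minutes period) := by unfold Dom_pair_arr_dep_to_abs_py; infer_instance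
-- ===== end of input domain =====

-- B replaces A's per-element repeated-addition while-loop by a single ceil-division
-- formula (objective: alternative; not measurably faster on the generated inputs).


-- ===== PORT A =====
-- the 'while d_abs < a_abs + dw: d_abs += period' loop; the '0 < period' conjunct is
-- only a totality guard (Python diverges there; such inputs are outside Pre_)
def bumpA (a dw period d : Int) : Int :=
  if _h : d < a + dw ∧ 0 < period then bumpA a dw period (d + period) else d
termination_by (a + dw - d).toNat
decreasing_by omega

-- the 'for a, d, dw in zip(...)' loop with its two accumulators
def loopA : List (Int × Int × Int) → Int → List Int × List Int
  | [], _ => ([], [])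
  | (a, d, dw) :: rest, period =>
      let d_abs := bumpA a dw period d
      let rest' := loopA rest period
      (a :: rest'.1, d_abs :: rest'.2)

def pair_arr_dep_to_abs_py (arr_minutes : List Int) (dep_minutes : List Int) (dwell_minutes : List Int) (period : Int) : List Int × List Int :=
  let arr_mod := arr_minutes.map (fun x => PySem.Int.mod x period)
  let dep_mod := dep_minutes.map (fun x => PySem.Int.mod x period)
  loopA (arr_mod.zip (dep_mod.zip dwell_minutes)) period

-- ===== PORT B =====
-- _snap: one ceil-division step instead of a loop; '-(-need // period)' is ceil(need/period)
def snapB (x y z period : Int) : Int × Int :=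
  let a := PySem.Int.mod x period
  let d := PySem.Int.mod y period
  let need := a + z - d
  if need > 0 then (a, d + (-(PySem.Int.floordiv (-need) period)) * period) else (a, d)

def pair_arr_dep_to_abs_py_alt (arr_minutes : List Int) (dep_minutes : List Int) (dwell_minutes : List Int) (period : Int) : List Int × List Int :=
  let pairs := (arr_minutes.zip (dep_minutes.zip dwell_minutes)).map
      (fun t => snapB t.1 t.2.1 t.2.2 period)
  (pairs.map (fun p => p.1), pairs.map (fun p => p.2))

-- ===== PRECONDITION & SPEC =====
-- Pre_ excludes exactly the inputs where A does not return: period = 0 (ZeroDivisionError)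
-- and period < 0 with some dep_mod < arr_mod + dwell (the while loop never terminates).
def Pre_pair_arr_dep_to_abs_py (arr_minutes : List Int) (dep_minutes : List Int) (dwell_minutes : List Int) (period : Int) : Prop :=
  period ≠ 0 ∧ (0 < period ∨ ∀ t ∈ arr_minutes.zip (dep_minutes.zip dwell_minutes),
    PySem.Int.mod t.1 period + t.2.2 ≤ PySem.Int.mod t.2.1 period)
instance (arr_minutes : List Int) (dep_minutes : List Int) (dwell_minutes : List Int) (period : Int) : Decidable (Pre_pair_arr_dep_to_abs_py arr_minutes dep_minutes dwell_minutes period) := by unfold Pre_pair_arr_dep_to_abs_py; infer_instance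

def pvWitness_pair_arr_dep_to_abs_py : List Int × List Int × List Int × Int := ([0, 10], [5, 20], [3, 60], 60)

def Spec_pair_arr_dep_to_abs_py (arr_minutes : List Int) (dep_minutes : List Int) (dwell_minutes : List Int) (period : Int) (out : List Int × List Int) : Prop := out = pair_arr_dep_to_abs_py_alt arr_minutes dep_minutes dwell_minutes period
instance (arr_minutes : List Int) (dep_minutes : List Int) (dwell_minutes : List Int) (period : Int) (out : List Int × List Int) : Decidable (Spec_pair_arr_dep_to_abs_py arr_minutes dep_minutes dwell_minutes period out) := by unfold Spec_pair_arr_dep_to_abs_py; infer_instance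

-- ===== CLAIM (what is proved, stated in full; the proofs are below) =====
def Claim_equal_pair_arr_dep_to_abs_py : Prop := ∀ (arr_minutes : List Int) (dep_minutes : List Int) (dwell_minutes : List Int) (period : Int), Dom_pair_arr_dep_to_abs_py arr_minutes dep_minutes dwell_minutes period → Pre_pair_arr_dep_to_abs_py arr_minutes dep_minutes dwell_minutes period → Spec_pair_arr_dep_to_abs_py arr_minutes dep_minutes dwell_minutes period (pair_arr_dep_to_abs_py arr_minutes dep_minutes dwell_minutes period)

-- ===== LEMMAS AND PROOFS =====

-- for 0 < period the while-loop equals the ceil-division closed form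
lemma bumpA_eq_pos (a dw period : Int) (hp : 0 < period) :
    ∀ n : Nat, ∀ d : Int, (a + dw - d).toNat ≤ n →
      bumpA a dw period d =
        (if a + dw - d > 0
         then d + (-(PySem.Int.floordiv (-(a + dw - d)) period)) * period
         else d) := by
  intro n
  induction n with
  | zero =>
      intro d hd
      rw [bumpA]
      rw [dif_neg (by omega), if_neg (by omega)]
  | succ n ih =>
      intro d hd
      by_cases h : d < a + dw
      · rw [bumpA, dif_pos ⟨h, hp⟩, ih (d + period) (by omega)]
        by_cases h' : a + dw - (d + period) > 0
        · rw [if_pos h', if_pos (show a + dw - d > 0 by omega)]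
          -- k' := ceil((need - period)/period); then ceil(need/period) = k' + 1
          set k' := -(PySem.Int.floordiv (-(a + dw - (d + period))) period) with hk'
          have hb := (PySem.Int.neg_floordiv_neg_eq_iff_of_pos
            (a := a + dw - (d + period)) (b := period) (q := k') hp).mp rfl
          have hk : -(PySem.Int.floordiv (-(a + dw - d)) period) = k' + 1 := by
            refine (PySem.Int.neg_floordiv_neg_eq_iff_of_pos hp).mpr ⟨?_, ?_⟩ <;>
              nlinarith [hb.1, hb.2]
          rw [hk]; ring
        · rw [if_neg h', if_pos (show a + dw - d > 0 by omega)]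
          have hk : -(PySem.Int.floordiv (-(a + dw - d)) period) = 1 := by
            refine (PySem.Int.neg_floordiv_neg_eq_iff_of_pos hp).mpr ⟨by omega, by omega⟩
          rw [hk]; ring
      · rw [bumpA, dif_neg (by omega), if_neg (by omega)]

-- pointwise: A's snapped departure equals B's
lemma bumpA_eq_snapB (x y z period : Int)
    (h : 0 < period ∨ PySem.Int.mod x period + z ≤ PySem.Int.mod y period) :
    (PySem.Int.mod x period, bumpA (PySem.Int.mod x period) z period (PySem.Int.mod y period))
      = snapB x y z period := by
  unfold snapB
  set a := PySem.Int.mod x period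
  set d := PySem.Int.mod y period
  rcases h with hp | hle
  · rw [bumpA_eq_pos a z period hp (a + z - d).toNat d le_rfl]
    by_cases hn : a + z - d > 0
    · rw [if_pos hn, if_pos (by omega)]
    · rw [if_neg hn, if_neg (by omega)]
  · rw [bumpA, dif_neg (by omega), if_neg (by omega)]

-- the two list traversals agree
lemma loops_eq (period : Int) :
    ∀ (arr dep dwell : List Int),
      (0 < period ∨ ∀ t ∈ arr.zip (dep.zip dwell),
        PySem.Int.mod t.1 period + t.2.2 ≤ PySem.Int.mod t.2.1 period) →
      pair_arr_dep_to_abs_py arr dep dwell period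
        = pair_arr_dep_to_abs_py_alt arr dep dwell period := by
  intro arr
  induction arr with
  | nil =>
      intro dep dwell _
      simp [pair_arr_dep_to_abs_py, pair_arr_dep_to_abs_py_alt, loopA]
  | cons x arr ih =>
      intro dep dwell h
      cases dep with
      | nil => simp [pair_arr_dep_to_abs_py, pair_arr_dep_to_abs_py_alt, loopA]
      | cons y dep =>
        cases dwell with
        | nil => simp [pair_arr_dep_to_abs_py, pair_arr_dep_to_abs_py_alt, loopA]
        | cons z dwell =>
          have hhead : 0 < period ∨
              PySem.Int.mod x period + z ≤ PySem.Int.mod y period := by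
            rcases h with hp | hall
            · exact Or.inl hp
            · exact Or.inr (hall (x, (y, z)) (by simp))
          have htail := ih dep dwell (by
            rcases h with hp | hall
            · exact Or.inl hp
            · exact Or.inr (fun t ht => hall t (by simp [ht])))
          have hsnap := bumpA_eq_snapB x y z period hhead
          simp only [pair_arr_dep_to_abs_py, pair_arr_dep_to_abs_py_alt,
            List.map_cons, List.zip_cons_cons, loopA] at htail ⊢
          rw [htail, ← hsnap]

-- ===== VERDICT (by name: the statement is the Claim_ definition above) =====
theorem pair_arr_dep_to_abs_py_spec : Claim_equal_pair_arr_dep_to_abs_py := by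
  intro arr dep dwell period _ hpre
  unfold Spec_pair_arr_dep_to_abs_py
  exact loops_eq period arr dep dwell hpre.2
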